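-- pv_equiv track=rewrite | github.com/thevibethinker/n5os-ode | N5/scripts/gtm_db_builder.py | infer_stakeholder_type
-- ===== SOURCE A (Python) =====
-- def infer_stakeholder_type(stakeholder_name: str, stakeholder_role: str) -> str:
--     """Infer stakeholder type from name/role"""
--     role_lower = (stakeholder_role or "").lower()
--     name_lower = stakeholder_name.lower()
--
--     if any(x in role_lower for x in ['recruiter', 'recruiting', 'talent']):
--         return 'recruiter'
--     elif any(x in role_lower for x in ['founder', 'ceo', 'co-founder']):
--         return 'founder'
--     elif any(x in role_lower for x in ['director', 'vp', 'senior', 'manager']) and          any(x in role_lower for x in ['google', 'microsoft', 'amazon', 'meta', 'apple']):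
--         return 'big_company'
--     elif any(x in role_lower for x in ['consultant', 'advisor', 'coach']):
--         return 'consultant'
--     elif any(x in role_lower for x in ['university', 'education', 'professor', 'year up']):
--         return 'education'
--     else:
--         return 'other'
-- ===== SOURCE B (Python) =====
-- # Flat keyword->flag table; one exhaustive pass collects matched flags into a set,
-- # then a priority list resolved by subset test picks the label.
-- KEYWORD_FLAGS = [
--     ('recruiter', 'R'), ('recruiting', 'R'), ('talent', 'R'),
--     ('founder', 'F'), ('ceo', 'F'), ('co-founder', 'F'),
--     ('director', 'T'), ('vp', 'T'), ('senior', 'T'), ('manager', 'T'),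
--     ('google', 'C'), ('microsoft', 'C'), ('amazon', 'C'), ('meta', 'C'), ('apple', 'C'),
--     ('consultant', 'K'), ('advisor', 'K'), ('coach', 'K'),
--     ('university', 'E'), ('education', 'E'), ('professor', 'E'), ('year up', 'E'),
-- ]
--
-- PRIORITY = [
--     ('R', 'recruiter'),
--     ('F', 'founder'),
--     ('TC', 'big_company'),
--     ('K', 'consultant'),
--     ('E', 'education'),
-- ]
--
-- def infer_stakeholder_type(stakeholder_name: str, stakeholder_role: str) -> str:
--     """Infer stakeholder type from name/role"""
--     role_lower = (stakeholder_role or "").lower()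
--     hits = {flag for kw, flag in KEYWORD_FLAGS if kw in role_lower}
--     for needed, label in PRIORITY:
--         if set(needed) <= hits:
--             return label
--     return 'other'
-- ===== Notes on version B (the rewrite author's own statement) =====
-- stated objective: alternative
-- what changed: Instead of an if/elif chain that tests keyword groups lazily per branch, B makes one exhaustive pass over a flat keyword->flag table collecting the set of matched flags, then resolves the label from a priority list by a subset test on that flag set (big_company = needs both flags 'T' and 'C').
import Mathlib
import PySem

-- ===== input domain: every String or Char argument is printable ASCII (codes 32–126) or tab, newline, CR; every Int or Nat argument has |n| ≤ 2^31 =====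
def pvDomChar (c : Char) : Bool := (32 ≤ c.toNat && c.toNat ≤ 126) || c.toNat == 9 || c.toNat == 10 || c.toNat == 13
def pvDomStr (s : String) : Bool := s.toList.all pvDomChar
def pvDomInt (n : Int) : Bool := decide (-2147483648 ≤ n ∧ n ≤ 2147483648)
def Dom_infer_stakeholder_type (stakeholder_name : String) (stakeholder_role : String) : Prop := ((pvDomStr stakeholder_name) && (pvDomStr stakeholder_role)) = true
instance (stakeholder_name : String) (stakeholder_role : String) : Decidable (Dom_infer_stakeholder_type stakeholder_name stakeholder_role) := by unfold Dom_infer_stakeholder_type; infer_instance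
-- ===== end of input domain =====

-- B replaces A's lazy if/elif keyword-group chain by one exhaustive pass over a flat keyword->flag table
-- collecting a set of matched flags, then resolves the label from a priority list by a subset test (alternative decomposition; same cost).


-- ===== PORT A =====
def infer_stakeholder_type (stakeholder_name : String) (stakeholder_role : String) : String :=
  let role_lower := PySem.Str.lower stakeholder_role  -- '(stakeholder_role or "")' is the identity on strings ("" stays "")
  let _name_lower := PySem.Str.lower stakeholder_name  -- computed but unused in A
  if ["recruiter", "recruiting", "talent"].any (fun x => PySem.Str.isIn x role_lower) then
    "recruiter"
  else if ["founder", "ceo", "co-founder"].any (fun x => PySem.Str.isIn x role_lower) then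
    "founder"
  else if ["director", "vp", "senior", "manager"].any (fun x => PySem.Str.isIn x role_lower)
      && ["google", "microsoft", "amazon", "meta", "apple"].any (fun x => PySem.Str.isIn x role_lower) then
    "big_company"
  else if ["consultant", "advisor", "coach"].any (fun x => PySem.Str.isIn x role_lower) then
    "consultant"
  else if ["university", "education", "professor", "year up"].any (fun x => PySem.Str.isIn x role_lower) then
    "education"
  else
    "other"

-- ===== PORT B =====
-- flat keyword -> flag table (Source B's KEYWORD_FLAGS)
def pvKeywordFlags : List (String × Char) :=
  [("recruiter", 'R'), ("recruiting", 'R'), ("talent", 'R'),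
   ("founder", 'F'), ("ceo", 'F'), ("co-founder", 'F'),
   ("director", 'T'), ("vp", 'T'), ("senior", 'T'), ("manager", 'T'),
   ("google", 'C'), ("microsoft", 'C'), ("amazon", 'C'), ("meta", 'C'), ("apple", 'C'),
   ("consultant", 'K'), ("advisor", 'K'), ("coach", 'K'),
   ("university", 'E'), ("education", 'E'), ("professor", 'E'), ("year up", 'E')]

-- priority list (Source B's PRIORITY; the needed-flags string ported as its list of chars)
def pvPriority : List (List Char × String) :=
  [(['R'], "recruiter"), (['F'], "founder"), (['T', 'C'], "big_company"),
   (['K'], "consultant"), (['E'], "education")]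

def infer_stakeholder_type_alt (stakeholder_name : String) (stakeholder_role : String) : String :=
  let role_lower := PySem.Str.lower stakeholder_role
  -- hits = {flag for kw, flag in KEYWORD_FLAGS if kw in role_lower}
  let hits : PySem.Set Char :=
    PySem.Set.ofList ((pvKeywordFlags.filter (fun p => PySem.Str.isIn p.1 role_lower)).map Prod.snd)
  match pvPriority.find? (fun pr => PySem.Set.issubset (PySem.Set.ofList pr.1) hits) with
  | some pr => pr.2
  | none => "other"

-- ===== PRECONDITION & SPEC =====
def Spec_infer_stakeholder_type (stakeholder_name : String) (stakeholder_role : String) (out : String) : Prop := out = infer_stakeholder_type_alt stakeholder_name stakeholder_role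
instance (stakeholder_name : String) (stakeholder_role : String) (out : String) : Decidable (Spec_infer_stakeholder_type stakeholder_name stakeholder_role out) := by unfold Spec_infer_stakeholder_type; infer_instance

-- ===== CLAIM (what is proved, stated in full; the proofs are below) =====
def Claim_equal_infer_stakeholder_type : Prop := ∀ (stakeholder_name : String) (stakeholder_role : String), Dom_infer_stakeholder_type stakeholder_name stakeholder_role → Spec_infer_stakeholder_type stakeholder_name stakeholder_role (infer_stakeholder_type stakeholder_name stakeholder_role)

-- ===== LEMMAS AND PROOFS =====

-- membership of a flag in the collected hits set = some table row with that flag matched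
theorem contains_hits_eq (l : List (String × Char)) (g : String × Char → Bool) (c : Char) :
    PySem.Set.contains (PySem.Set.ofList ((l.filter g).map Prod.snd)) c
      = l.any (fun p => g p && p.2 == c) := by
  rw [Bool.eq_iff_iff]
  simp only [PySem.Set.contains_iff, PySem.Set.mem_ofList, List.mem_map, List.mem_filter,
    List.any_eq_true, Bool.and_eq_true, beq_iff_eq]
  constructor
  · rintro ⟨p, ⟨hp, hg⟩, hc⟩; exact ⟨p, hp, hg, hc⟩
  · rintro ⟨p, hp, hg, hc⟩; exact ⟨p, ⟨hp, hg⟩, hc⟩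

theorem issubset_ofList_all {α : Type} [BEq α] [LawfulBEq α] (xs : List α) (s : PySem.Set α) :
    PySem.Set.issubset (PySem.Set.ofList xs) s = xs.all (fun x => PySem.Set.contains s x) := by
  rw [Bool.eq_iff_iff]
  simp [PySem.Set.issubset_iff, PySem.Set.mem_ofList, List.all_eq_true]

-- ===== VERDICT (by name: the statement is the Claim_ definition above) =====
theorem infer_stakeholder_type_spec : Claim_equal_infer_stakeholder_type := by
  intro sn sr _
  unfold Spec_infer_stakeholder_type infer_stakeholder_type infer_stakeholder_type_alt pvPriority
  simp only [List.find?, issubset_ofList_all, contains_hits_eq, pvKeywordFlags,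
    List.all_cons, List.all_nil, List.any_cons, List.any_nil,
    Bool.or_false, Bool.and_true, Bool.and_false, Bool.false_or, Bool.or_self,
    beq_self_eq_true, Char.reduceBEq]
  generalize (PySem.Str.isIn "recruiter" (PySem.Str.lower sr) || (PySem.Str.isIn "recruiting" (PySem.Str.lower sr) || PySem.Str.isIn "talent" (PySem.Str.lower sr))) = c1
  generalize (PySem.Str.isIn "founder" (PySem.Str.lower sr) || (PySem.Str.isIn "ceo" (PySem.Str.lower sr) || PySem.Str.isIn "co-founder" (PySem.Str.lower sr))) = c2
  generalize (PySem.Str.isIn "director" (PySem.Str.lower sr) || (PySem.Str.isIn "vp" (PySem.Str.lower sr) || (PySem.Str.isIn "senior" (PySem.Str.lower sr) || PySem.Str.isIn "manager" (PySem.Str.lower sr)))) = c3a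
  generalize (PySem.Str.isIn "google" (PySem.Str.lower sr) || (PySem.Str.isIn "microsoft" (PySem.Str.lower sr) || (PySem.Str.isIn "amazon" (PySem.Str.lower sr) || (PySem.Str.isIn "meta" (PySem.Str.lower sr) || PySem.Str.isIn "apple" (PySem.Str.lower sr))))) = c3b
  generalize (PySem.Str.isIn "consultant" (PySem.Str.lower sr) || (PySem.Str.isIn "advisor" (PySem.Str.lower sr) || PySem.Str.isIn "coach" (PySem.Str.lower sr))) = c4
  generalize (PySem.Str.isIn "university" (PySem.Str.lower sr) || (PySem.Str.isIn "education" (PySem.Str.lower sr) || (PySem.Str.isIn "professor" (PySem.Str.lower sr) || PySem.Str.isIn "year up" (PySem.Str.lower sr)))) = c5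
  cases c1 <;> cases c2 <;> cases c3a <;> cases c3b <;> cases c4 <;> cases c5 <;> rfl
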